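-- pv_equiv track=rewrite | github.com/lwb69/TCM-KBQA | QA_system/train_ner.py | restore_entity_from_labels_on_corpus
-- ===== SOURCE A (Python) =====
-- def restore_entity_from_labels_on_corpus(predicty,questions):
--     def restore_entity_from_labels(labels,question):
--         entitys = []
--         str = ''
--         labels = labels[1:-1]
--         for i in range(min(len(labels),len(question))):
--             if labels[i]==1:
--                 str += question[i]
--             else:
--                 if len(str):
--                     entitys.append(str)
--                     str = ''
--         if len(str):
--             entitys.append(str)
--         return entitys
--     all_entitys = []
--     for i in range(len(predicty)):
--         all_entitys.append(restore_entity_from_labels(predicty[i],questions[i]))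
--     return all_entitys
-- ===== SOURCE B (Python) =====
-- from itertools import groupby
--
-- def restore_entity_from_labels_on_corpus(predicty, questions):
--     def restore(labels, question):
--         res = []
--         for key, grp in groupby(zip(labels[1:-1], question), key=lambda p: p[0] == 1):
--             if key:
--                 res.append(''.join(ch for _, ch in grp))
--         return res
--     return [restore(p, q) for p, q in zip(predicty, questions)]
-- ===== Notes on version B (the rewrite author's own statement) =====
-- stated objective: idiomatic
-- what changed: Replaces A's index loop with a manual string accumulator and flush logic by an itertools.groupby pass over zip(labels[1:-1], question), joining each group whose key (label==1) is true, and builds the outer list by zipping predicty with questions instead of indexing.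
import Mathlib
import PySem

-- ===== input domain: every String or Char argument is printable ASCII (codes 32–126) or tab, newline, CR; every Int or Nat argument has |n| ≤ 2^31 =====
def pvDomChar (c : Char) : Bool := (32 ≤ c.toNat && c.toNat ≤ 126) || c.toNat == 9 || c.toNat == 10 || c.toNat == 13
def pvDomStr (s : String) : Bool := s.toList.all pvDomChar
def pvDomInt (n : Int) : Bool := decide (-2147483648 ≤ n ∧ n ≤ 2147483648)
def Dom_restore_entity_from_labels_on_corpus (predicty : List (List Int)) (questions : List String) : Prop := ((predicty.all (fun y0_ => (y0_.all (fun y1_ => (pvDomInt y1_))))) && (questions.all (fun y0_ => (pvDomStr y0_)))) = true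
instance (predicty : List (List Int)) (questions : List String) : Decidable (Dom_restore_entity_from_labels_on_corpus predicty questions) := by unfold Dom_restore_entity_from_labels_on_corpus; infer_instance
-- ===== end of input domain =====

-- B rewrites A's accumulator/flush index loop as an itertools.groupby pass over zip(labels[1:-1], question) (idiomatic); return value only, no mutation involved.

-- ===== PORT A =====
-- inner helper restore_entity_from_labels: index loop with a string accumulator flushed at each non-1 label
def pvAInner (labels : List Int) (question : String) : List String :=
  let labels2 := PySem.List.slice labels (some 1) (some (-1))
  let q := question.toList
  let st := (PySem.List.pyRange 0 (min labels2.length q.length : Nat) 1).foldl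
    (fun (st : List String × List Char) i =>
      if PySem.List.pyGetD labels2 i 0 == 1 then
        (st.1, st.2 ++ [PySem.List.pyGetD q i ' '])
      else
        if st.2.length ≠ 0 then (st.1 ++ [String.ofList st.2], []) else st)
    ([], [])
  if st.2.length ≠ 0 then st.1 ++ [String.ofList st.2] else st.1

def restore_entity_from_labels_on_corpus (predicty : List (List Int)) (questions : List String) : List (List String) :=
  (PySem.List.pyRange 0 (predicty.length : Nat) 1).foldl
    (fun acc i => acc ++ [pvAInner (PySem.List.pyGetD predicty i []) (PySem.List.pyGetD questions i "")]) []

-- ===== PORT B =====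
-- inner helper: groupby(zip(labels[1:-1], question), key = p[0]==1); ''.join each group whose key is True
def pvBInner (labels : List Int) (question : String) : List String :=
  let pairs := (PySem.List.slice labels (some 1) (some (-1))).zip question.toList
  ((pairs.splitBy (fun a b => (a.1 == 1) == (b.1 == 1))).filter
      (fun g => match g with | [] => false | p :: _ => p.1 == 1)).map
    (fun g => String.ofList (g.map Prod.snd))

def restore_entity_from_labels_on_corpus_alt (predicty : List (List Int)) (questions : List String) : List (List String) :=
  (predicty.zip questions).map (fun pq => pvBInner pq.1 pq.2)

-- ===== PRECONDITION & SPEC =====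
-- A indexes questions[i] for every i < len(predicty): it raises IndexError when questions is shorter than predicty.
def Pre_restore_entity_from_labels_on_corpus (predicty : List (List Int)) (questions : List String) : Prop :=
  predicty.length ≤ questions.length
instance (predicty : List (List Int)) (questions : List String) : Decidable (Pre_restore_entity_from_labels_on_corpus predicty questions) := by unfold Pre_restore_entity_from_labels_on_corpus; infer_instance

def pvWitness_restore_entity_from_labels_on_corpus : List (List Int) × List String :=
  ([[0, 1, 1, 0, 1, 0], [0, 1, 0]], ["abcd", "xy"])

def Spec_restore_entity_from_labels_on_corpus (predicty : List (List Int)) (questions : List String) (out : List (List String)) : Prop := out = restore_entity_from_labels_on_corpus_alt predicty questions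
instance (predicty : List (List Int)) (questions : List String) (out : List (List String)) : Decidable (Spec_restore_entity_from_labels_on_corpus predicty questions out) := by unfold Spec_restore_entity_from_labels_on_corpus; infer_instance

-- ===== CLAIM (what is proved, stated in full; the proofs are below) =====
def Claim_equal_restore_entity_from_labels_on_corpus : Prop := ∀ (predicty : List (List Int)) (questions : List String), Dom_restore_entity_from_labels_on_corpus predicty questions → Pre_restore_entity_from_labels_on_corpus predicty questions → Spec_restore_entity_from_labels_on_corpus predicty questions (restore_entity_from_labels_on_corpus predicty questions)
-- ===== LEMMAS AND PROOFS =====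

-- A's loop body and final flush, named for the proofs
def pvStep (st : List String × List Char) (p : Int × Char) : List String × List Char :=
  if p.1 == 1 then (st.1, st.2 ++ [p.2])
  else if st.2.length ≠ 0 then (st.1 ++ [String.ofList st.2], []) else st

def pvFin (st : List String × List Char) : List String :=
  if st.2.length ≠ 0 then st.1 ++ [String.ofList st.2] else st.1

-- A's flush state machine written structurally: cur is the pending run of 1-labelled chars
def pvEmit : List Char → List (Int × Char) → List String
  | cur, [] => if cur.length ≠ 0 then [String.ofList cur] else []
  | cur, (l, c) :: rest =>
    if l == 1 then pvEmit (cur ++ [c]) rest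
    else (if cur.length ≠ 0 then [String.ofList cur] else []) ++ pvEmit [] rest

lemma pvFold_eq_emit (pairs : List (Int × Char)) :
    ∀ (acc : List String) (cur : List Char),
      pvFin (pairs.foldl pvStep (acc, cur)) = acc ++ pvEmit cur pairs := by
  induction pairs with
  | nil =>
    intro acc cur
    by_cases h : cur.length ≠ 0 <;> simp [pvEmit, pvFin, h]
  | cons p rest ih =>
    intro acc cur
    obtain ⟨l, c⟩ := p
    rw [List.foldl_cons]
    by_cases h1 : (l == 1) = true
    · rw [show pvStep (acc, cur) (l, c) = (acc, cur ++ [c]) by simp [pvStep, h1]]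
      rw [ih acc (cur ++ [c])]
      simp [pvEmit, h1]
    · by_cases h2 : cur.length ≠ 0
      · rw [show pvStep (acc, cur) (l, c) = (acc ++ [String.ofList cur], []) by
          simp [pvStep, h1, h2]]
        rw [ih (acc ++ [String.ofList cur]) []]
        simp [pvEmit, h1, h2]
      · have hc : cur = [] := by simpa using h2
        rw [show pvStep (acc, cur) (l, c) = (acc, cur) by simp [pvStep, h1, h2]]
        rw [ih acc cur]
        simp [pvEmit, h1, hc]

-- fold over range(min(len xs, len cs)) with indexing = fold over the zip
lemma pvRange_zip :
    ∀ (xs : List Int) (cs : List Char) (st : List String × List Char),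
      (List.range (min xs.length cs.length)).foldl
        (fun st i =>
          if xs.getD i 0 == 1 then (st.1, st.2 ++ [cs.getD i ' '])
          else if st.2.length ≠ 0 then (st.1 ++ [String.ofList st.2], []) else st) st
      = (xs.zip cs).foldl pvStep st := by
  intro xs
  induction xs with
  | nil => intro cs st; simp
  | cons x xs ih =>
    intro cs st
    cases cs with
    | nil => simp
    | cons c cs =>
      rw [show min (x :: xs).length (c :: cs).length = min xs.length cs.length + 1 by
        simp [Nat.succ_min_succ]]
      rw [List.range_succ_eq_map]
      simp only [List.foldl_cons, List.foldl_map, List.getD_cons_zero, List.getD_cons_succ,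
        List.zip_cons_cons]
      rw [show (if (x == 1) = true then (st.1, st.2 ++ [c])
            else if st.2.length ≠ 0 then (st.1 ++ [String.ofList st.2], []) else st)
          = pvStep st (x, c) from rfl]
      exact ih cs (pvStep st (x, c))

def pvKey1 : List (Int × Char) → Bool
  | [] => false
  | p :: _ => p.1 == 1

def pvBres (pairs : List (Int × Char)) : List String :=
  ((pairs.splitBy (fun a b => (a.1 == 1) == (b.1 == 1))).filter pvKey1).map
    (fun g => String.ofList (g.map Prod.snd))

lemma pvLoop_cons {α : Type} (R : α → α → Bool) (a : α) (as : List α) (b : α) (r : List α)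
    (acc : List (List α)) :
    List.splitBy.loop R (a :: as) b r acc
    = if R b a then List.splitBy.loop R as a (b :: r) acc
      else List.splitBy.loop R as a [] ((b :: r).reverse :: acc) := by
  rw [List.splitBy.loop]; cases h : R b a <;> simp

lemma pvLoop_nil {α : Type} (R : α → α → Bool) (b : α) (r : List α) (acc : List (List α)) :
    List.splitBy.loop R [] b r acc = ((b :: r).reverse :: acc).reverse := by
  simp [List.splitBy.loop]

-- run structure of splitBy for a key-equality relation
lemma pvSplitBy_loop_eq {α : Type} (f : α → Bool) :
    ∀ (as : List α) (b : α) (r : List α) (acc : List (List α)),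
      List.splitBy.loop (fun x y => f x == f y) as b r acc
      = acc.reverse ++ ((r.reverse ++ b :: as.takeWhile (fun a => f a == f b))
          :: List.splitBy (fun x y => f x == f y) (as.dropWhile (fun a => f a == f b))) := by
  intro as
  induction as with
  | nil =>
    intro b r acc
    rw [pvLoop_nil]
    simp [List.splitBy]
  | cons a as ih =>
    intro b r acc
    rw [pvLoop_cons]
    by_cases h : f a = f b
    · rw [if_pos (by simp [h])]
      rw [ih a (b :: r) acc]
      have hpred : (fun x => f x == f a) = (fun x => f x == f b) := by
        funext x; simp [h]
      simp [List.takeWhile_cons, List.dropWhile_cons, h, hpred]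
    · rw [if_neg (by simp; intro hc; exact h hc.symm)]
      rw [ih a [] ((b :: r).reverse :: acc)]
      rw [List.takeWhile_cons_of_neg (by simp [h]), List.dropWhile_cons_of_neg (by simp [h])]
      rw [show List.splitBy (fun x y => f x == f y) (a :: as)
            = List.splitBy.loop (fun x y => f x == f y) as a [] [] from rfl]
      rw [ih a [] []]
      simp

lemma pvSplitBy_cons {α : Type} (f : α → Bool) (a : α) (as : List α) :
    List.splitBy (fun x y => f x == f y) (a :: as)
    = (a :: as.takeWhile (fun x => f x == f a))
       :: List.splitBy (fun x y => f x == f y) (as.dropWhile (fun x => f x == f a)) := by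
  rw [show List.splitBy (fun x y => f x == f y) (a :: as)
        = List.splitBy.loop (fun x y => f x == f y) as a [] [] from rfl]
  rw [pvSplitBy_loop_eq]
  simp

lemma pvBres_cons (l : Int) (c : Char) (rest : List (Int × Char)) :
    pvBres ((l, c) :: rest)
    = (if (l == 1) = true
        then [String.ofList (c :: (rest.takeWhile (fun p => (p.1 == 1) == (l == 1))).map Prod.snd)]
        else [])
      ++ pvBres (rest.dropWhile (fun p => (p.1 == 1) == (l == 1))) := by
  unfold pvBres
  rw [show (fun (a b : Int × Char) => (a.1 == 1) == (b.1 == 1))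
        = (fun a b => (fun p : Int × Char => p.1 == 1) a == (fun p : Int × Char => p.1 == 1) b)
      from rfl]
  rw [pvSplitBy_cons (fun p : Int × Char => p.1 == 1)]
  by_cases h1 : (l == 1) = true <;>
    simp [List.filter_cons, pvKey1, h1]

lemma pvEmit_run (rest : List (Int × Char)) :
    ∀ (cur : List Char), cur ≠ [] →
      pvEmit cur rest
      = String.ofList (cur ++ (rest.takeWhile (fun p => p.1 == 1)).map Prod.snd)
          :: pvEmit [] (rest.dropWhile (fun p => p.1 == 1)) := by
  induction rest with
  | nil => intro cur hc; simp [pvEmit, List.length_eq_zero_iff, hc]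
  | cons p rest ih =>
    intro cur hc
    obtain ⟨l, c⟩ := p
    by_cases h1 : (l == 1) = true
    · rw [show pvEmit cur ((l, c) :: rest) = pvEmit (cur ++ [c]) rest by simp [pvEmit, h1]]
      rw [ih (cur ++ [c]) (by simp)]
      simp [List.takeWhile_cons, List.dropWhile_cons, h1]
    · rw [show pvEmit cur ((l, c) :: rest)
            = (if cur.length ≠ 0 then [String.ofList cur] else []) ++ pvEmit [] rest by
          simp [pvEmit, h1]]
      simp [List.takeWhile_cons, List.dropWhile_cons, h1, List.length_eq_zero_iff, hc, pvEmit]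

lemma pvEmit_eq_Bres : ∀ (n : Nat) (pairs : List (Int × Char)), pairs.length ≤ n →
    pvEmit [] pairs = pvBres pairs := by
  intro n
  induction n with
  | zero =>
    intro pairs h
    rw [List.length_eq_zero_iff.mp (Nat.le_zero.mp h)]
    simp [pvEmit, pvBres, List.splitBy]
  | succ n ih =>
    intro pairs h
    cases pairs with
    | nil => simp [pvEmit, pvBres, List.splitBy]
    | cons p rest =>
      obtain ⟨l, c⟩ := p
      rw [pvBres_cons]
      by_cases h1 : (l == 1) = true
      · rw [show pvEmit [] ((l, c) :: rest) = pvEmit [c] rest by simp [pvEmit, h1]]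
        rw [pvEmit_run rest [c] (by simp)]
        rw [ih (rest.dropWhile (fun p => p.1 == 1))
            (le_trans (List.length_dropWhile_le _ _) (by simpa using Nat.le_of_succ_le_succ h))]
        have hpred : (fun p : Int × Char => (p.1 == 1) == (l == 1))
            = (fun p : Int × Char => p.1 == 1) := by
          funext p; rw [h1]; cases p.1 == 1 <;> simp
        simp [h1, hpred]
      · rw [show pvEmit [] ((l, c) :: rest) = pvEmit [] rest by simp [pvEmit, h1]]
        have h1' : (l == 1) = false := eq_false_of_ne_true h1
        have hpred : (fun p : Int × Char => (p.1 == 1) == (l == 1))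
            = (fun p : Int × Char => !(p.1 == 1)) := by
          funext p; rw [h1']; cases p.1 == 1 <;> simp
        rw [hpred, if_neg h1]
        -- skip the leading non-1 run on the emit side as well
        have hskip : pvEmit [] rest = pvEmit [] (rest.dropWhile (fun p : Int × Char => !(p.1 == 1))) := by
          clear ih h hpred
          induction rest with
          | nil => simp
          | cons q rest ihq =>
            obtain ⟨l2, c2⟩ := q
            by_cases h2 : (l2 == 1) = true
            · simp [List.dropWhile_cons, h2]
            · rw [show pvEmit [] ((l2, c2) :: rest) = pvEmit [] rest by simp [pvEmit, h2]]
              simp only [List.dropWhile_cons]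
              rw [if_pos (by simp [eq_false_of_ne_true h2])]
              exact ihq
        rw [hskip]
        rw [ih (rest.dropWhile (fun p : Int × Char => !(p.1 == 1)))
            (le_trans (List.length_dropWhile_le _ _) (by simpa using Nat.le_of_succ_le_succ h))]
        simp

lemma pvInner_eq (labels : List Int) (question : String) :
    pvAInner labels question = pvBInner labels question := by
  simp only [pvAInner, pvBInner]
  rw [PySem.List.pyRange_zero_nat]
  simp only [List.foldl_map, PySem.List.pyGetD_natCast]
  rw [show ∀ (st : List String × List Char),
        (if st.2.length ≠ 0 then st.1 ++ [String.ofList st.2] else st.1) = pvFin st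
      from fun _ => rfl]
  rw [pvRange_zip]
  rw [pvFold_eq_emit]
  rw [pvEmit_eq_Bres _ _ (le_refl _)]
  rfl

lemma pvMap_range_zip :
    ∀ (ps : List (List Int)) (qs : List String), ps.length ≤ qs.length →
      (List.range ps.length).map (fun i => pvAInner (ps.getD i []) (qs.getD i ""))
        = (ps.zip qs).map (fun pq => pvAInner pq.1 pq.2) := by
  intro ps
  induction ps with
  | nil => intro qs _; simp
  | cons p ps ih =>
    intro qs hlen
    cases qs with
    | nil => simp at hlen
    | cons q qs =>
      rw [List.length_cons, List.range_succ_eq_map]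
      simp only [List.map_cons, List.map_map, List.zip_cons_cons, List.getD_cons_zero]
      rw [show ((fun i => pvAInner ((p :: ps).getD i []) ((q :: qs).getD i "")) ∘ (· + 1))
            = (fun i => pvAInner (ps.getD i []) (qs.getD i "")) from by
          funext i; simp [Function.comp, List.getD_cons_succ]]
      rw [ih qs (by simpa using hlen)]

-- ===== VERDICT (by name: the statement is the Claim_ definition above) =====
theorem restore_entity_from_labels_on_corpus_spec : Claim_equal_restore_entity_from_labels_on_corpus := by
  intro predicty questions _ hpre
  unfold Spec_restore_entity_from_labels_on_corpus
  unfold restore_entity_from_labels_on_corpus restore_entity_from_labels_on_corpus_alt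
  rw [PySem.List.pyRange_zero_nat]
  simp only [List.foldl_map, PySem.List.pyGetD_natCast]
  rw [PySem.List.foldl_append_singleton_eq_map]
  rw [pvMap_range_zip predicty questions hpre]
  simp [pvInner_eq]
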